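-- pv_equiv track=rewrite | github.com/MatheusFerraroni/ga_ia_p2 | plots/plot.py | minConfig
-- ===== SOURCE A (Python) =====
-- def minConfig(vector):
-- 	minimo = vector[0][0]
-- 	indice = 0
-- 	for i in range(len(vector)):
-- 		for j in range(len(vector[i])):
-- 			if vector[i][j] < minimo:
-- 				minimo = vector[i][j]
-- 				indice = i
--
-- 	return minimo,indice
-- ===== SOURCE B (Python) =====
-- def minConfig(vector):
-- 	# pass 1: compute only the minimum value over all elements
-- 	minimo = vector[0][0]
-- 	for row in vector:
-- 		for x in row:
-- 			if x < minimo: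
-- 				minimo = x
-- 	# pass 2: locate the first row containing that minimum
-- 	for i in range(len(vector)):
-- 		if minimo in vector[i]:
-- 			return minimo, i
-- ===== Notes on version B (the rewrite author's own statement) =====
-- stated objective: alternative
-- what changed: A tracks (min, row index) in one index-carrying scan; B computes the minimum alone in a first pass and then finds the first row containing it in a second membership pass.
-- outside the precondition, e.g. on minConfig([]): A raises IndexError, B raises IndexError; on minConfig([[]]): A raises IndexError, B raises IndexError
import Mathlib
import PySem

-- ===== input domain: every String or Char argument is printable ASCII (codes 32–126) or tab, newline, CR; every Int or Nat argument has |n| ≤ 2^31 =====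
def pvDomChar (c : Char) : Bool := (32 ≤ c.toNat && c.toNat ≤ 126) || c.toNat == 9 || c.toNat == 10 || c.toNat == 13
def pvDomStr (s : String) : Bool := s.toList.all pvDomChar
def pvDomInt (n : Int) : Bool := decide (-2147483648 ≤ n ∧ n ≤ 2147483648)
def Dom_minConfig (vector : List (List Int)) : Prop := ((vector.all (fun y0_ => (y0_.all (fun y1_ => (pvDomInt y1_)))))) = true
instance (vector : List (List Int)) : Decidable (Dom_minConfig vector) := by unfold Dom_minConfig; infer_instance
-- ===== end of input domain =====

-- ===== PORT A =====
-- A: single pass over rows carrying (running min, row index of last strict improvement).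
def minConfigLoop : List (List Int) → Nat → Int × Int → Int × Int
  | [], _, mi => mi
  | row :: rest, i, mi =>
      minConfigLoop rest (i + 1)
        (row.foldl (fun mi x => if x < mi.1 then (x, (i : Int)) else mi) mi)

def minConfig (vector : List (List Int)) : Int × Int :=
  minConfigLoop vector 0 (((vector.headD []).headD 0), 0)

-- ===== PORT B =====
-- B pass 1: the minimum value alone.
def minConfigAltMin (vector : List (List Int)) : Int :=
  vector.foldl (fun m row => row.foldl (fun m x => if x < m then x else m) m)
    ((vector.headD []).headD 0)

-- B pass 2: first row index containing the minimum (Python B returns inside the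
-- loop on every input in Pre_; the [] case is unreachable there).
def minConfigAltFind (m : Int) : List (List Int) → Int → Int × Int
  | [], _ => (m, 0)
  | row :: rest, i => if m ∈ row then (m, i) else minConfigAltFind m rest (i + 1)

def minConfig_alt (vector : List (List Int)) : Int × Int :=
  minConfigAltFind (minConfigAltMin vector) vector 0

-- ===== PRECONDITION & SPEC =====
-- Pre_ excludes exactly the inputs where A raises IndexError: vector[0][0] must exist.
def Pre_minConfig (vector : List (List Int)) : Prop :=
  vector ≠ [] ∧ vector.headD [] ≠ []
instance (vector : List (List Int)) : Decidable (Pre_minConfig vector) := by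
  unfold Pre_minConfig; infer_instance
def pvWitness_minConfig : List (List Int) := [[1]]
def Spec_minConfig (vector : List (List Int)) (out : Int × Int) : Prop := out = minConfig_alt vector
instance (vector : List (List Int)) (out : Int × Int) : Decidable (Spec_minConfig vector out) := by unfold Spec_minConfig; infer_instance

-- ===== CLAIM (what is proved, stated in full; the proofs are below) =====
def Claim_equal_minConfig : Prop := ∀ (vector : List (List Int)), Dom_minConfig vector → Pre_minConfig vector → Spec_minConfig vector (minConfig vector)

-- ===== LEMMAS AND PROOFS =====

-- the row-fold min with if-then-else is List.foldl min
lemma foldl_ite_min (r : List Int) (m : Int) :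
    r.foldl (fun m x => if x < m then x else m) m = r.foldl min m := by
  induction r generalizing m with
  | nil => rfl
  | cons x r ih =>
      simp only [List.foldl]
      have h : (if x < m then x else m) = min m x := by
        rcases lt_or_ge x m with h | h <;> simp [min_def] <;> omega
      rw [h, ih]

lemma foldl_min_le (r : List Int) (m : Int) : r.foldl min m ≤ m := by
  induction r generalizing m with
  | nil => simp
  | cons x r ih => exact le_trans (ih (min m x)) (min_le_left _ _)

lemma foldl_min_le_of_mem (r : List Int) (m x : Int) : x ∈ r → r.foldl min m ≤ x := by
  induction r generalizing m with
  | nil => intro hx; simp at hx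
  | cons y r ih =>
      intro hx
      simp only [List.foldl]
      rcases List.mem_cons.mp hx with h | h
      · subst h
        exact le_trans (foldl_min_le r _) (min_le_right _ _)
      · exact ih _ h

lemma foldl_min_mem (r : List Int) (m : Int) (h : r.foldl min m < m) :
    r.foldl min m ∈ r := by
  induction r generalizing m with
  | nil => simp at h
  | cons x r ih =>
      simp only [List.foldl] at h ⊢
      by_cases hx : r.foldl min (min m x) < min m x
      · exact List.mem_cons_of_mem _ (ih _ hx)
      · have hle := foldl_min_le r (min m x)
        have heq : r.foldl min (min m x) = min m x := le_antisymm hle (le_of_not_gt hx)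
        rw [heq] at h ⊢
        have hmx : min m x = x := by
          rcases le_total m x with h' | h'
          · exfalso; rw [min_eq_left h'] at h; omega
          · exact min_eq_right h' 
        simp [hmx]

-- global min over rows, as B's first pass computes it (after foldl_ite_min)
def gmin (rows : List (List Int)) (m : Int) : Int :=
  rows.foldl (fun m r => r.foldl min m) m

lemma gmin_le (rows : List (List Int)) (m : Int) : gmin rows m ≤ m := by
  induction rows generalizing m with
  | nil => simp [gmin]
  | cons r rs ih => exact le_trans (ih _) (foldl_min_le r m)

lemma foldl_ite_min_rows (rows : List (List Int)) (m : Int) :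
    rows.foldl (fun m row => row.foldl (fun m x => if x < m then x else m) m) m
      = gmin rows m := by
  induction rows generalizing m with
  | nil => rfl
  | cons r rs ih =>
      show List.foldl _ (r.foldl (fun m x => if x < m then x else m) m) rs = _
      rw [foldl_ite_min]
      exact ih _

-- index (relative) of the first row containing g
def fRow (g : Int) : List (List Int) → Nat
  | [] => 0
  | r :: rs => if g ∈ r then 0 else 1 + fRow g rs

lemma gmin_mem (rows : List (List Int)) (m : Int) (h : gmin rows m < m) :
    ∃ r ∈ rows, gmin rows m ∈ r := by
  induction rows generalizing m with
  | nil => simp [gmin] at h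
  | cons r rs ih =>
      simp only [gmin, List.foldl] at h ⊢
      by_cases hx : gmin rs (r.foldl min m) < r.foldl min m
      · obtain ⟨r', hr', hm⟩ := ih _ hx
        exact ⟨r', List.mem_cons_of_mem _ hr', hm⟩
      · have hle := gmin_le rs (r.foldl min m)
        have heq : gmin rs (r.foldl min m) = r.foldl min m :=
          le_antisymm hle (le_of_not_gt hx)
        unfold gmin at heq
        rw [heq] at h ⊢
        exact ⟨r, List.mem_cons_self, foldl_min_mem r m h⟩

-- characterisation of A's loop
lemma minConfigLoop_eq (rows : List (List Int)) (i : Nat) (m idx : Int) :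
    minConfigLoop rows i (m, idx) =
      (gmin rows m,
       if gmin rows m < m then (i : Int) + (fRow (gmin rows m) rows : Nat) else idx) := by
  induction rows generalizing i m idx with
  | nil => simp [minConfigLoop, gmin]
  | cons r rs ih =>
      have hinner : ∀ (m idx : Int),
          r.foldl (fun mi x => if x < mi.1 then (x, (i : Int)) else mi) (m, idx) =
            (r.foldl min m, if r.foldl min m < m then (i : Int) else idx) := by
        intro m idx
        induction r generalizing m idx with
        | nil => simp
        | cons x r ihr =>
            simp only [List.foldl]
            by_cases hx : x < m
            · rw [if_pos hx, ihr]
              have h1 : min m x = x := by simp [min_def]; omega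
              simp only [h1]
              have h2 : r.foldl min x < m := lt_of_le_of_lt (foldl_min_le r x) hx
              simp [h2]
            · rw [if_neg hx, ihr]
              have h1 : min m x = m := by simp [min_def]; omega
              simp only [h1]
      simp only [minConfigLoop]
      rw [hinner, ih]
      have hg : gmin (r :: rs) m = gmin rs (r.foldl min m) := rfl
      rw [hg]
      have hle : gmin rs (r.foldl min m) ≤ r.foldl min m := gmin_le rs _
      have hm'le : r.foldl min m ≤ m := foldl_min_le r m
      by_cases h1 : gmin rs (r.foldl min m) < r.foldl min m
      · -- the global min is strictly below everything in row r, so it is not in r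
        have hlt : gmin rs (r.foldl min m) < m := lt_of_lt_of_le h1 hm'le
        rw [if_pos h1, if_pos hlt]
        have hnotin : gmin rs (r.foldl min m) ∉ r := by
          intro hmem
          have := foldl_min_le_of_mem r m _ hmem
          omega
        simp only [fRow, if_neg hnotin, Prod.mk.injEq, true_and]
        push_cast
        omega
      · have hgeq : gmin rs (r.foldl min m) = r.foldl min m := le_antisymm hle (le_of_not_gt h1)
        rw [if_neg h1, hgeq]
        by_cases h2 : r.foldl min m < m
        · rw [if_pos h2, if_pos h2]
          have hmem : r.foldl min m ∈ r := foldl_min_mem r m h2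
          simp [fRow, hmem]
        · rw [if_neg h2, if_neg h2]

-- characterisation of B's second pass
lemma minConfigAltFind_eq (g : Int) (rows : List (List Int)) (i : Int)
    (h : ∃ r ∈ rows, g ∈ r) :
    minConfigAltFind g rows i = (g, i + (fRow g rows : Nat)) := by
  induction rows generalizing i with
  | nil => simp at h
  | cons r rs ih =>
      simp only [minConfigAltFind, fRow]
      by_cases hm : g ∈ r
      · simp [hm]
      · rw [if_neg hm, ih]
        · simp [hm]
          omega
        · rcases h with ⟨r', hr', hg⟩
          rcases List.mem_cons.mp hr' with h' | h'
          · exact absurd (h' ▸ hg) hm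
          · exact ⟨r', h', hg⟩

-- ===== VERDICT (by name: the statement is the Claim_ definition above) =====
theorem minConfig_spec : Claim_equal_minConfig := by
  intro vector _ hpre
  obtain ⟨hne, hhd⟩ := hpre
  obtain ⟨x, xs, rs, rfl⟩ : ∃ x xs rs, vector = (x :: xs) :: rs := by
    cases vector with
    | nil => exact absurd rfl hne
    | cons r rest =>
      cases r with
      | nil => simp at hhd
      | cons a b => exact ⟨a, b, rest, rfl⟩
  unfold Spec_minConfig minConfig minConfig_alt minConfigAltMin
  rw [foldl_ite_min_rows]
  simp only [List.headD]
  rw [minConfigLoop_eq]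
  by_cases hlt : gmin ((x :: xs) :: rs) x < x
  · rw [if_pos hlt, minConfigAltFind_eq _ _ 0 (gmin_mem _ _ hlt)]
    simp
  · have hEq : gmin ((x :: xs) :: rs) x = x := le_antisymm (gmin_le _ _) (le_of_not_gt hlt)
    rw [if_neg hlt, hEq]
    have hmem : x ∈ x :: xs := List.mem_cons_self
    simp [minConfigAltFind, hmem]
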